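-- pv_equiv track=rewrite | github.com/dl-dayup/LawLLMEval | ChatGLM/batch_sfks_m.py | split_lists
-- ===== SOURCE A (Python) =====
-- def split_lists(list1, list2, size=100):
--      if len(list1) != len(list2):
--          raise ValueError("两个列表的长度必须相同")
--      result = []
--      num_groups = (len(list1) + size - 1) // size  # 使用整除和向上取整
--      for i in range(num_groups):
--         start_index = i * size
--         end_index = min((i + 1) * size, len(list1))
--         result.append((list1[start_index:end_index], list2[start_index:end_index]))
--      return result
-- ===== SOURCE B (Python) =====
-- def split_lists(list1, list2, size=100):
--     if len(list1) != len(list2):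
--         raise ValueError("两个列表的长度必须相同")
--     result = []
--     buf1, buf2 = [], []
--     for x, y in zip(list1, list2):
--         buf1.append(x)
--         buf2.append(y)
--         if len(buf1) == size:
--             result.append((buf1, buf2))
--             buf1, buf2 = [], []
--     if buf1:
--         result.append((buf1, buf2))
--     return result
-- ===== Notes on version B (the rewrite author's own statement) =====
-- stated objective: alternative
-- what changed: Replaces the group-count computation plus index-boundary slicing with a single pass over zip(list1, list2) that fills running chunk buffers, emitting a chunk when a buffer reaches size and flushing the remainder at the end.
-- outside the precondition, e.g. on split_lists([1], [1], -1): A returns [([], [])], B returns [([1], [1])]; on split_lists([], [], -1): A returns [([], []), ([], [])], B returns []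
import Mathlib
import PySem

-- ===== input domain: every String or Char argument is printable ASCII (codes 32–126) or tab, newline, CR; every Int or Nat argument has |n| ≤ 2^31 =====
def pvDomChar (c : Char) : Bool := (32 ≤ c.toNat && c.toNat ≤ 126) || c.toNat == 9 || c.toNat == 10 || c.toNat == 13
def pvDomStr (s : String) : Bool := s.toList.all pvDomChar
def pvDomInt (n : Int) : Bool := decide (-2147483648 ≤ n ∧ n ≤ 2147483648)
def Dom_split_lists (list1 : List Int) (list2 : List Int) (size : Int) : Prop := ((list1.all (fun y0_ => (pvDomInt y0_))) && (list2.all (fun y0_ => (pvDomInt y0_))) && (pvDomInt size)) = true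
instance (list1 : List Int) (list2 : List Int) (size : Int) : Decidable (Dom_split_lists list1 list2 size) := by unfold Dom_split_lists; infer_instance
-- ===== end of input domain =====

-- B replaces A's group-count/index-slicing scheme with a single zip pass that fills chunk
-- buffers and flushes them; equivalence is proved for equal-length lists and positive size.

-- ===== PORT A =====
def split_lists (list1 : List Int) (list2 : List Int) (size : Int) : List (List Int × List Int) :=
  -- the Python raises ValueError when the lengths differ and ZeroDivisionError when size = 0;
  -- Pre_ excludes those inputs, so the port just performs the loop
  let numGroups : Int := PySem.Int.floordiv ((list1.length : Int) + size - 1) size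
  (PySem.List.pyRange 0 numGroups 1).foldl
    (fun result i =>
      let startIndex := i * size
      let endIndex := min ((i + 1) * size) ((list1.length : Int))
      result ++ [(PySem.List.slice list1 (some startIndex) (some endIndex),
                  PySem.List.slice list2 (some startIndex) (some endIndex))]) []

-- ===== PORT B =====
def bLoop (size : Int) : List (Int × Int) → List Int → List Int → List (List Int × List Int) → List (List Int × List Int)
  | [], buf1, buf2, result => if buf1.isEmpty then result else result ++ [(buf1, buf2)]
  | (x, y) :: rest, buf1, buf2, result =>
      let b1 := buf1 ++ [x]
      let b2 := buf2 ++ [y]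
      if (b1.length : Int) = size then bLoop size rest [] [] (result ++ [(b1, b2)])
      else bLoop size rest b1 b2 result

def split_lists_alt (list1 : List Int) (list2 : List Int) (size : Int) : List (List Int × List Int) :=
  bLoop size (list1.zip list2) [] [] []

-- ===== PRECONDITION & SPEC =====
-- Pre_ requires equal lengths (the Python raises ValueError otherwise) and a positive size:
-- size = 0 raises ZeroDivisionError, and a negative chunk size is outside the natural domain —
-- A returns degenerate empty-slice groups there, an artifact of its floor division.
def Pre_split_lists (list1 : List Int) (list2 : List Int) (size : Int) : Prop :=
  list1.length = list2.length ∧ 1 ≤ size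
instance (list1 : List Int) (list2 : List Int) (size : Int) : Decidable (Pre_split_lists list1 list2 size) := by unfold Pre_split_lists; infer_instance

def pvWitness_split_lists : List Int × List Int × Int := ([1, 2, 3], [4, 5, 6], 2)

def Spec_split_lists (list1 : List Int) (list2 : List Int) (size : Int) (out : List (List Int × List Int)) : Prop := out = split_lists_alt list1 list2 size
instance (list1 : List Int) (list2 : List Int) (size : Int) (out : List (List Int × List Int)) : Decidable (Spec_split_lists list1 list2 size out) := by unfold Spec_split_lists; infer_instance

-- ===== CLAIM (what is proved, stated in full; the proofs are below) =====
def Claim_equal_split_lists : Prop := ∀ (list1 : List Int) (list2 : List Int) (size : Int), Dom_split_lists list1 list2 size → Pre_split_lists list1 list2 size → Spec_split_lists list1 list2 size (split_lists list1 list2 size)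

-- ===== LEMMAS AND PROOFS =====

-- common specification: successive (take kt, drop kt) chunks of the two lists
def chunksC (kt : Nat) (l1 l2 : List Int) : List (List Int × List Int) :=
  if h : kt = 0 ∨ l1 = [] then []
  else (l1.take kt, l2.take kt) :: chunksC kt (l1.drop kt) (l2.drop kt)
termination_by l1.length
decreasing_by
  push_neg at h
  simp only [List.length_drop]
  have : l1.length ≠ 0 := by simpa using h.2
  omega

theorem bLoop_eq (kt : Nat) (hk : 1 ≤ kt) :
    ∀ (l1 l2 b1 b2 : List Int) (res : List (List Int × List Int)),
      l1.length = l2.length → b1.length = b2.length → b1.length < kt →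
      bLoop (kt : Int) (l1.zip l2) b1 b2 res = res ++ chunksC kt (b1 ++ l1) (b2 ++ l2) := by
  intro l1
  induction l1 with
  | nil =>
    intro l2 b1 b2 res hl hb hlt
    have hl2 : l2 = [] := by cases l2 <;> simp_all
    subst hl2
    simp only [List.zip_nil_right, bLoop, List.append_nil]
    rcases Decidable.em (b1 = []) with h1 | h1
    · subst h1
      have hb2 : b2 = [] := by cases b2 <;> simp_all
      subst hb2
      rw [chunksC]
      simp
    · rw [chunksC]
      have : ¬ (kt = 0 ∨ b1 = []) := by
        push_neg; exact ⟨by omega, h1⟩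
      rw [dif_neg this]
      have ht1 : b1.take kt = b1 := List.take_of_length_le (by omega)
      have ht2 : b2.take kt = b2 := List.take_of_length_le (by omega)
      have hd1 : b1.drop kt = [] := List.drop_eq_nil_of_le (by omega)
      have hd2 : b2.drop kt = [] := List.drop_eq_nil_of_le (by omega)
      rw [ht1, ht2, hd1, hd2, chunksC]
      simp [h1]
  | cons x t1 ih =>
    intro l2 b1 b2 res hl hb hlt
    obtain ⟨y, t2, rfl⟩ : ∃ y t2, l2 = y :: t2 := by
      cases l2 with
      | nil => simp at hl
      | cons y t2 => exact ⟨y, t2, rfl⟩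
    simp only [List.zip_cons_cons, bLoop, List.length_append, List.length_cons,
      List.length_nil]
    have hlen : t1.length = t2.length := by simpa using hl
    rcases Decidable.em (((b1.length + 1 : Nat) : Int) = (kt : Int)) with he | he
    · rw [if_pos (by exact_mod_cast he)]
      have hke : b1.length + 1 = kt := by exact_mod_cast he
      rw [ih t2 [] [] (res ++ [(b1 ++ [x], b2 ++ [y])]) hlen rfl (by simp only [List.length_nil]; omega)]
      have hsplit1 : b1 ++ x :: t1 = (b1 ++ [x]) ++ t1 := by simp
      have hsplit2 : b2 ++ y :: t2 = (b2 ++ [y]) ++ t2 := by simp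
      conv_rhs => rw [hsplit1, hsplit2, chunksC]
      have hne : ¬ (kt = 0 ∨ (b1 ++ [x]) ++ t1 = []) := by
        push_neg; exact ⟨by omega, by simp⟩
      rw [dif_neg hne]
      have h1 : ((b1 ++ [x]) ++ t1).take kt = b1 ++ [x] := by
        rw [List.take_left' (by simp; omega)]
      have h2 : ((b2 ++ [y]) ++ t2).take kt = b2 ++ [y] := by
        rw [List.take_left' (by simp; omega)]
      have h3 : ((b1 ++ [x]) ++ t1).drop kt = t1 := by
        rw [List.drop_left' (by simp; omega)]
      have h4 : ((b2 ++ [y]) ++ t2).drop kt = t2 := by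
        rw [List.drop_left' (by simp; omega)]
      rw [h1, h2, h3, h4]
      simp [List.append_assoc]
    · rw [if_neg (by exact_mod_cast he)]
      have hke : b1.length + 1 ≠ kt := by exact_mod_cast he
      rw [ih t2 (b1 ++ [x]) (b2 ++ [y]) res hlen (by simp [hb]) (by simp; omega)]
      simp [List.append_assoc]

def fA (l1 l2 : List Int) (size : Int) (i : Int) : List Int × List Int :=
  (PySem.List.slice l1 (some (i * size)) (some (min ((i + 1) * size) ((l1.length : Int)))),
   PySem.List.slice l2 (some (i * size)) (some (min ((i + 1) * size) ((l1.length : Int)))))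

theorem split_eq_map (l1 l2 : List Int) (size : Int) :
    split_lists l1 l2 size =
      (PySem.List.pyRange 0 (PySem.Int.floordiv ((l1.length : Int) + size - 1) size) 1).map
        (fA l1 l2 size) := by
  have h := PySem.List.foldl_append_singleton_eq_map (f := fA l1 l2 size)
    (l := PySem.List.pyRange 0 (PySem.Int.floordiv ((l1.length : Int) + size - 1) size) 1)
    (acc := [])
  simpa [split_lists, fA] using h

theorem pyRange_shift : ∀ (k : Nat) (a b : Int), (b - a).toNat = k →
    PySem.List.pyRange (a + 1) (b + 1) 1 = (PySem.List.pyRange a b 1).map (· + 1)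
  | 0, a, b, h => by
      rw [PySem.List.pyRange_one_eq_nil (by omega), PySem.List.pyRange_one_eq_nil (by omega : b ≤ a)]
      simp
  | k + 1, a, b, h => by
      have hab : a < b := by omega
      rw [PySem.List.pyRange_one_cons (by omega), PySem.List.pyRange_one_cons hab,
        List.map_cons, pyRange_shift k (a + 1) b (by omega)]

theorem pyRange_shift' (q : Int) (hq : 0 ≤ q) :
    PySem.List.pyRange 1 (q + 1) 1 = (PySem.List.pyRange 0 q 1).map (· + 1) := by
  have h := pyRange_shift q.toNat 0 q (by omega)
  simpa using h

theorem fA_natCast (l1 l2 : List Int) (kt j : Nat) :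
    fA l1 l2 (kt : Int) ((j : Nat) : Int) =
      ((l1.drop (j * kt)).take (min ((j + 1) * kt) l1.length - j * kt),
       (l2.drop (j * kt)).take (min ((j + 1) * kt) l1.length - j * kt)) := by
  unfold fA
  have h1 : (j : Int) * (kt : Int) = ((j * kt : Nat) : Int) := by push_cast; ring
  have h2 : min (((j : Int) + 1) * (kt : Int)) ((l1.length : Int))
      = ((min ((j + 1) * kt) l1.length : Nat) : Int) := by
    rw [Nat.cast_min]
    congr 1
  rw [h1, h2, PySem.List.slice_natCast, PySem.List.slice_natCast]

theorem take_min_length (l : List Int) (k m : Nat) (hm : l.length ≤ m) :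
    l.take (min k m) = l.take k := by
  rcases le_total k m with h | h
  · rw [min_eq_left h]
  · rw [min_eq_right h, List.take_of_length_le hm, List.take_of_length_le (le_trans hm h)]

theorem mapA (kt : Nat) (hk : 1 ≤ kt) :
    ∀ (m : Nat) (l1 l2 : List Int), l1.length ≤ m → l1.length = l2.length →
      (PySem.List.pyRange 0 (((l1.length + kt - 1) / kt : Nat) : Int) 1).map (fA l1 l2 (kt : Int))
        = chunksC kt l1 l2 := by
  intro m
  induction m with
  | zero =>
    intro l1 l2 hm hl
    have h0 : l1 = [] := List.eq_nil_of_length_eq_zero (by omega)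
    subst h0
    have hz : (([] : List Int).length + kt - 1) / kt = 0 := Nat.div_eq_of_lt (by simp; omega)
    rw [hz, chunksC]
    simp [PySem.List.pyRange_one_eq_nil]
  | succ m ih =>
    intro l1 l2 hm hl
    cases l1 with
    | nil =>
      have hz : (([] : List Int).length + kt - 1) / kt = 0 := Nat.div_eq_of_lt (by simp; omega)
      rw [hz, chunksC]
      simp [PySem.List.pyRange_one_eq_nil]
    | cons x t1 =>
      have hg : ((x :: t1).length + kt - 1) / kt = t1.length / kt + 1 := by
        rw [show (x :: t1).length + kt - 1 = t1.length + kt by simp, Nat.add_div_right _ (by omega)]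
      rw [hg, show ((t1.length / kt + 1 : Nat) : Int) = ((t1.length / kt : Nat) : Int) + 1 by push_cast; ring]
      have hq : (0 : Int) ≤ ((t1.length / kt : Nat) : Int) := Int.natCast_nonneg _
      rw [PySem.List.pyRange_one_cons (by omega)]
      simp only [zero_add]
      rw [pyRange_shift' _ hq, List.map_cons, List.map_map]
      conv_rhs => rw [chunksC]
      rw [dif_neg (by push_neg; exact ⟨by omega, by simp⟩)]
      congr 1
      · have h0 := fA_natCast (x :: t1) l2 kt 0
        simp only [Nat.cast_zero, Nat.zero_mul, Nat.zero_add, Nat.one_mul, Nat.sub_zero,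
          List.drop_zero] at h0
        rw [h0]
        congr 1
        · exact take_min_length _ _ _ le_rfl
        · exact take_min_length _ _ _ (le_of_eq hl.symm)
      · have hlen2 : ((x :: t1).drop kt).length = ((l2.drop kt)).length := by
          simp [List.length_drop, hl]
        have hle : ((x :: t1).drop kt).length ≤ m := by
          simp only [List.length_drop, List.length_cons]
          simp only [List.length_cons] at hm
          omega
        rw [← ih ((x :: t1).drop kt) (l2.drop kt) hle hlen2]
        have hqeq : t1.length / kt = (((x :: t1).drop kt).length + kt - 1) / kt := by
          simp only [List.length_drop, List.length_cons]
          rcases le_total kt (t1.length + 1) with h | h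
          · congr 1
            omega
          · rw [Nat.div_eq_of_lt (by omega), Nat.div_eq_of_lt (by omega)]
        rw [← hqeq]
        apply List.map_congr_left
        intro i hi
        have hi0 : 0 ≤ i := (PySem.List.mem_pyRange_one.mp hi).1
        obtain ⟨j, rfl⟩ : ∃ j : Nat, i = (j : Int) := ⟨i.toNat, (Int.toNat_of_nonneg hi0).symm⟩
        simp only [Function.comp]
        rw [show ((j : Nat) : Int) + 1 = (((j + 1 : Nat)) : Int) by push_cast; ring,
          fA_natCast, fA_natCast]
        have hidx : kt + j * kt = (j + 1) * kt := by ring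
        have hd1 : ((x :: t1).drop kt).drop (j * kt) = (x :: t1).drop ((j + 1) * kt) := by
          rw [List.drop_drop, hidx]
        have hd2 : (l2.drop kt).drop (j * kt) = l2.drop ((j + 1) * kt) := by
          rw [List.drop_drop, hidx]
        have hamt : min ((j + 1 + 1) * kt) (x :: t1).length - (j + 1) * kt
            = min ((j + 1) * kt) ((x :: t1).drop kt).length - j * kt := by
          simp only [List.length_drop]
          have e1 : (j + 1 + 1) * kt = j * kt + kt + kt := by ring
          have e2 : (j + 1) * kt = j * kt + kt := by ring
          rw [e1, e2]
          omega
        rw [hd1, hd2, hamt]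

theorem A_eq (kt : Nat) (hk : 1 ≤ kt) (l1 l2 : List Int) (hl : l1.length = l2.length) :
    split_lists l1 l2 (kt : Int) = chunksC kt l1 l2 := by
  rw [split_eq_map]
  have hc : (l1.length : Int) + (kt : Int) - 1 = ((l1.length + kt - 1 : Nat) : Int) := by
    omega
  rw [hc, PySem.Int.floordiv_natCast]
  exact mapA kt hk l1.length l1 l2 le_rfl hl

-- ===== VERDICT (by name: the statement is the Claim_ definition above) =====
theorem split_lists_spec : Claim_equal_split_lists := by
  intro l1 l2 size _hdom hpre
  obtain ⟨hl, hs⟩ := hpre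
  unfold Spec_split_lists
  obtain ⟨kt, rfl⟩ : ∃ kt : Nat, size = (kt : Int) :=
    ⟨size.toNat, (Int.toNat_of_nonneg (by omega)).symm⟩
  have hk : 1 ≤ kt := by exact_mod_cast hs
  rw [A_eq kt hk l1 l2 hl]
  unfold split_lists_alt
  rw [bLoop_eq kt hk l1 l2 [] [] [] hl rfl (by simp only [List.length_nil]; omega)]
  simp
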